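-- pv_equiv track=rewrite | github.com/MoranLeven/Python-String-Programs | String7.py | uno_y_ultimo
-- ===== SOURCE A (Python) =====
-- def uno_y_ultimo(string: str)-> str:
--     empty = ''
--     for j,i in enumerate(string):
--         if j == 0:
--             empty += i.upper()
--         elif j == (len(string)-1):
--             empty += i.upper()
--         else:
--             empty += i
--
--     return empty
-- ===== SOURCE B (Python) =====
-- def uno_y_ultimo(string: str) -> str:
--     if len(string) <= 1:
--         return string.upper()
--     return string[0].upper() + string[1:-1] + string[-1].upper()
-- ===== Notes on version B (the rewrite author's own statement) =====
-- stated objective: simpler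
-- what changed: Replaces the character-by-character enumerate loop with index-tested branches by a closed-form slicing expression: upper of the first char + unchanged middle slice + upper of the last char (whole-string upper for length <= 1).
import Mathlib
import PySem

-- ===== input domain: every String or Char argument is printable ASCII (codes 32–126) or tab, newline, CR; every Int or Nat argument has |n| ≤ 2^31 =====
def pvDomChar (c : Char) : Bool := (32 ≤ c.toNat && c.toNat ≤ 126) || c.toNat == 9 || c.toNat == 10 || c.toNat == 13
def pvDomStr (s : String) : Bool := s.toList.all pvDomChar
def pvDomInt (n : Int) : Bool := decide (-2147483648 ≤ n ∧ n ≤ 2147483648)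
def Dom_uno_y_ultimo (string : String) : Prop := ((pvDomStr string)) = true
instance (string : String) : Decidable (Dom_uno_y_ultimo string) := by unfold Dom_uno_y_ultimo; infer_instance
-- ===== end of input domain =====

-- B replaces A's enumerate loop with a closed-form slicing expression (objective: simpler).

-- ===== PORT A =====
-- A: build the result char by char over enumerate(string), uppercasing at index 0 and len-1.
def uno_y_ultimo (string : String) : String :=
  let cs := string.toList
  let empty : List Char :=
    (PySem.List.enumerate cs 0).foldl (fun acc ji =>
      if ji.1 = 0 then acc ++ [PySem.Chars.upperChar ji.2]
      else if ji.1 = (cs.length : Int) - 1 then acc ++ [PySem.Chars.upperChar ji.2]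
      else acc ++ [ji.2]) []
  String.ofList empty

-- ===== PORT B =====
-- B: len ≤ 1 → whole-string upper; else upper(s[0:1]) ++ s[1:-1] ++ upper(s[-1:]).
def uno_y_ultimo_alt (string : String) : String :=
  let cs := string.toList
  if cs.length ≤ 1 then String.ofList (PySem.Chars.upper cs)
  else String.ofList (PySem.Chars.upper (PySem.List.slice cs (some 0) (some 1))
        ++ PySem.List.slice cs (some 1) (some (-1))
        ++ PySem.Chars.upper (PySem.List.slice cs (some (-1)) none))

-- ===== PRECONDITION & SPEC =====
def Spec_uno_y_ultimo (string : String) (out : String) : Prop := out = uno_y_ultimo_alt string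
instance (string : String) (out : String) : Decidable (Spec_uno_y_ultimo string out) := by unfold Spec_uno_y_ultimo; infer_instance

-- ===== CLAIM (what is proved, stated in full; the proofs are below) =====
def Claim_equal_uno_y_ultimo : Prop := ∀ (string : String), Dom_uno_y_ultimo string → Spec_uno_y_ultimo string (uno_y_ultimo string)

-- ===== LEMMAS AND PROOFS =====

-- the branch function of A's loop body
def pvBr (n : Int) (ji : Int × Char) : Char :=
  if ji.1 = 0 then PySem.Chars.upperChar ji.2
  else if ji.1 = n - 1 then PySem.Chars.upperChar ji.2
  else ji.2

theorem pvList_eq (cs : List Char) :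
    (PySem.List.enumerate cs 0).foldl (fun acc ji =>
      if ji.1 = 0 then acc ++ [PySem.Chars.upperChar ji.2]
      else if ji.1 = ((cs.length : Int)) - 1 then acc ++ [PySem.Chars.upperChar ji.2]
      else acc ++ [ji.2]) []
    = (PySem.List.enumerate cs 0).map (pvBr (cs.length : Int)) := by
  have hf : (fun (acc : List Char) (ji : Int × Char) =>
      if ji.1 = 0 then acc ++ [PySem.Chars.upperChar ji.2]
      else if ji.1 = ((cs.length : Int)) - 1 then acc ++ [PySem.Chars.upperChar ji.2]
      else acc ++ [ji.2])
      = (fun acc ji => acc ++ [pvBr (cs.length : Int) ji]) := by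
    funext acc ji
    simp only [pvBr]
    split_ifs <;> rfl
  rw [hf, PySem.List.foldl_append_singleton_eq_map, List.nil_append]

theorem pvMid_eq (mid : List Char) (s n : Int) (h1 : 1 ≤ s) (h2 : s + mid.length ≤ n - 1) :
    (PySem.List.enumerate mid s).map (pvBr n) = mid := by
  have : (PySem.List.enumerate mid s).map (pvBr n)
       = (PySem.List.enumerate mid s).map (·.2) := by
    apply List.map_congr_left
    intro p hp
    rcases (PySem.List.mem_enumerate_iff mid s p).1 hp with ⟨k, hk, rfl⟩
    simp only [pvBr]
    rw [if_neg (by omega), if_neg (by omega)]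
  rw [this, PySem.List.map_snd_enumerate]

theorem uno_y_ultimo_spec_aux (string : String) :
    uno_y_ultimo string = uno_y_ultimo_alt string := by
  unfold uno_y_ultimo uno_y_ultimo_alt
  set cs := string.toList with hcs
  clear_value cs
  simp only []
  rw [pvList_eq]
  by_cases hle : cs.length ≤ 1
  · rw [if_pos hle]
    match cs, hle with
    | [], _ => rfl
    | [c], _ =>
      simp [PySem.List.enumerate, pvBr, PySem.Chars.upper]
  · rw [if_neg hle]
    -- cs = c :: mid ++ [d]
    obtain ⟨c, rest, rfl⟩ : ∃ c rest, cs = c :: rest := by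
      cases cs with
      | nil => simp at hle
      | cons c rest => exact ⟨c, rest, rfl⟩
    obtain ⟨mid, d, rfl⟩ : ∃ mid d, rest = mid ++ [d] := by
      cases h : rest.reverse with
      | nil => simp [List.reverse_eq_nil_iff] at h; subst h; simp at hle
      | cons d tl => exact ⟨tl.reverse, d, by rw [← List.reverse_reverse rest, h]; simp⟩
    have hlen : ((c :: (mid ++ [d])).length : Int) = mid.length + 2 := by
      simp; omega
    -- A side
    rw [show (c :: (mid ++ [d])) = [c] ++ (mid ++ [d]) from rfl]
    rw [PySem.List.enumerate_append, PySem.List.enumerate_append]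
    simp only [List.map_append]
    rw [pvMid_eq mid _ _ (by simp) (by simp; omega)]
    -- B side slices
    have hB0 : PySem.List.slice ([c] ++ (mid ++ [d])) (some 0) (some 1) = [c] := by
      simp [PySem.List.slice_toNat]
    have hB2 : PySem.List.slice ([c] ++ (mid ++ [d])) (some (-1)) none = [d] := by
      rw [PySem.List.slice_from_neg_one]
      simp
    have hB1 : PySem.List.slice ([c] ++ (mid ++ [d])) (some 1) (some (-1)) = mid := by
      simp [PySem.List.slice]
    rw [hB0, hB1, hB2]
    simp [PySem.List.enumerate, pvBr, PySem.Chars.upper]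
    rw [if_neg (by omega), if_pos (by omega)]

-- ===== VERDICT (by name: the statement is the Claim_ definition above) =====
theorem uno_y_ultimo_spec : Claim_equal_uno_y_ultimo := by
  intro string _
  unfold Spec_uno_y_ultimo
  exact uno_y_ultimo_spec_aux string
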